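-- pv_equiv track=rewrite | github.com/AndrewLrrr/f1-guru | main.py | rebuild_race_results_with_disqualified_drivers
-- ===== SOURCE A (Python) =====
-- def rebuild_race_results_with_disqualified_drivers(results):
--     """
--     Перестраивает результаты гонки если там есть дисквалифицированные гонщики,
--     в таком случае, данный гонщик извлекается из списка и добавляется в самый конец
--     итогового протокола, остальные, соответсвенно, поднимаются на одну позицию вверх
--     :param results: Результаты гонки
--     :return: list
--     """
--     new_res = []
--     disqualified = []
--     counter = 1
--     for pos, driver, team, average_speed, retire_lap in results:
--         if pos == 'DQ':
--             disqualified.append([driver, team, average_speed, retire_lap])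
--         else:
--             new_res.append((counter, driver, team, average_speed, retire_lap))
--             counter += 1
--     for driver, team, average_speed, retire_lap in disqualified:
--         new_res.append((counter, driver, team, average_speed, retire_lap))
--         counter += 1
--     return new_res
-- ===== SOURCE B (Python) =====
-- def rebuild_race_results_with_disqualified_drivers(results):
--     ordered = sorted(results, key=lambda r: r[0] == 'DQ')
--     return [(i, driver, team, average_speed, retire_lap)
--             for i, (_, driver, team, average_speed, retire_lap) in enumerate(ordered, 1)]
-- ===== Notes on version B (the rewrite author's own statement) =====
-- stated objective: alternative
-- what changed: Replaces the two-accumulator partition loop with explicit counter bookkeeping by a stable sort on the boolean key (pos == 'DQ') -- stability keeps non-DQ rows first and preserves each group's relative order -- followed by one enumerate(..., 1) pass assigning positions.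
import Mathlib
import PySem

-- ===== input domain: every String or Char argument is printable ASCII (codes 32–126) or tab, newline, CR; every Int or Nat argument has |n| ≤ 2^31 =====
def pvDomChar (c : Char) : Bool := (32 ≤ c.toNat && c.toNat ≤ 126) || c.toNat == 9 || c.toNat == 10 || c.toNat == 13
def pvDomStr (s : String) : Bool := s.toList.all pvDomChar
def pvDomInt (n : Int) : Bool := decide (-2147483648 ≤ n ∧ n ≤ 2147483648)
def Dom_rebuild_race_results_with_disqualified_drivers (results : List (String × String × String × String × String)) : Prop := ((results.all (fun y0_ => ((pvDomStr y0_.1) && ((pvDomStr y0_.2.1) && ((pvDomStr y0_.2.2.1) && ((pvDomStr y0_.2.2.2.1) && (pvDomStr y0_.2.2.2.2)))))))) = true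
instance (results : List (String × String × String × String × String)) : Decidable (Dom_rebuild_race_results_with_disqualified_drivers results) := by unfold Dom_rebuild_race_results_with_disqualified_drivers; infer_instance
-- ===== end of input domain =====

-- B replaces A's two-accumulator partition loop by a stable sort on the boolean key
-- (pos == 'DQ') followed by a single enumerate pass (objective: alternative algorithm).

-- ===== PORT A =====
-- first loop body: state = (new_res, disqualified, counter)
def pvAStep (st : List (Int × String × String × String × String) × List (String × String × String × String) × Int)
    (r : String × String × String × String × String) :
    List (Int × String × String × String × String) × List (String × String × String × String) × Int :=
  if r.1 == "DQ" then (st.1, st.2.1 ++ [r.2], st.2.2)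
  else (st.1 ++ [(st.2.2, r.2)], st.2.1, st.2.2 + 1)

-- second loop body: state = (new_res, counter)
def pvAStep2 (st : List (Int × String × String × String × String) × Int)
    (q : String × String × String × String) :
    List (Int × String × String × String × String) × Int :=
  (st.1 ++ [(st.2, q)], st.2 + 1)

def rebuild_race_results_with_disqualified_drivers (results : List (String × String × String × String × String)) : List (Int × String × String × String × String) :=
  let s := results.foldl pvAStep ([], [], 1)
  (s.2.1.foldl pvAStep2 (s.1, s.2.2)).1

-- ===== PORT B =====
-- ordered = sorted(results, key=lambda r: r[0] == 'DQ')  (stable sort, Bool key, False < True)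
def rebuild_race_results_with_disqualified_drivers_alt (results : List (String × String × String × String × String)) : List (Int × String × String × String × String) :=
  let ordered := PySem.List.sorted results (fun r => r.1 == "DQ") false
  (PySem.List.enumerate ordered 1).map (fun p => (p.1, p.2.2))

-- ===== PRECONDITION & SPEC =====
def Spec_rebuild_race_results_with_disqualified_drivers (results : List (String × String × String × String × String)) (out : List (Int × String × String × String × String)) : Prop := out = rebuild_race_results_with_disqualified_drivers_alt results
instance (results : List (String × String × String × String × String)) (out : List (Int × String × String × String × String)) : Decidable (Spec_rebuild_race_results_with_disqualified_drivers results out) := by unfold Spec_rebuild_race_results_with_disqualified_drivers; infer_instance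

-- ===== CLAIM =====
def Claim_equal_rebuild_race_results_with_disqualified_drivers : Prop := ∀ (results : List (String × String × String × String × String)), Dom_rebuild_race_results_with_disqualified_drivers results → Spec_rebuild_race_results_with_disqualified_drivers results (rebuild_race_results_with_disqualified_drivers results)

-- ===== LEMMAS AND PROOFS =====

-- A's two folds, characterised.
theorem pvA_fold1 (rs : List (String × String × String × String × String))
    (n : List (Int × String × String × String × String))
    (d : List (String × String × String × String)) (c : Int) :
    rs.foldl pvAStep (n, d, c) =
      (n ++ (PySem.List.enumerate (rs.filter (fun r => r.1 != "DQ")) c).map (fun p => (p.1, p.2.2)),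
       d ++ (rs.filter (fun r => r.1 == "DQ")).map (fun r => r.2),
       c + (rs.filter (fun r => r.1 != "DQ")).length) := by
  induction rs generalizing n d c with
  | nil => simp [PySem.List.enumerate_nil]
  | cons r rs ih =>
    by_cases h : r.1 = "DQ"
    · simp [pvAStep, h, ih]
    · simp [pvAStep, h, ih, PySem.List.enumerate_cons]
      omega

theorem pvA_fold2 (qs : List (String × String × String × String))
    (n : List (Int × String × String × String × String)) (c : Int) :
    (qs.foldl pvAStep2 (n, c)).1 =
      n ++ (PySem.List.enumerate qs c).map (fun p => (p.1, p.2)) := by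
  induction qs generalizing n c with
  | nil => simp [PySem.List.enumerate_nil]
  | cons q qs ih => simp [pvAStep2, ih, PySem.List.enumerate_cons]

theorem pv_enumerate_map {α β : Type} (f : α → β) (xs : List α) (s : Int) :
    PySem.List.enumerate (xs.map f) s = (PySem.List.enumerate xs s).map (fun p => (p.1, f p.2)) := by
  induction xs generalizing s with
  | nil => simp [PySem.List.enumerate_nil]
  | cons x xs ih => simp [PySem.List.enumerate_cons, ih]

-- insertBy with a never-true predicate appends at the end
theorem pv_insertBy_all_false {α : Type} (bef : α → α → Bool) (x : α) (ys : List α)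
    (h : ∀ y ∈ ys, bef x y = false) :
    PySem.List.insertBy bef x ys = ys ++ [x] := by
  induction ys with
  | nil => simp [PySem.List.insertBy]
  | cons y ys ih =>
    simp [PySem.List.insertBy, h y (List.mem_cons_self)]
    exact ih (fun z hz => h z (List.mem_cons_of_mem _ hz))

-- insertBy skips a prefix it does not go before
theorem pv_insertBy_append {α : Type} (bef : α → α → Bool) (x : α) (fs ts : List α)
    (h : ∀ y ∈ fs, bef x y = false) :
    PySem.List.insertBy bef x (fs ++ ts) = fs ++ PySem.List.insertBy bef x ts := by
  induction fs with
  | nil => simp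
  | cons f fs ih =>
    simp [PySem.List.insertBy, h f (List.mem_cons_self)]
    exact ih (fun z hz => h z (List.mem_cons_of_mem _ hz))

-- the stable insertion-sort fold with a Bool key, characterised as a partition
theorem pv_fold_insert_bool {α : Type} (k : α → Bool) (xs fs ts : List α)
    (hf : ∀ y ∈ fs, k y = false) (ht : ∀ y ∈ ts, k y = true) :
    xs.foldl (fun acc x => PySem.List.insertBy (fun a b => decide (k a < k b)) x acc) (fs ++ ts)
      = (fs ++ xs.filter (fun x => !(k x))) ++ (ts ++ xs.filter k) := by
  induction xs generalizing fs ts with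
  | nil => simp
  | cons x xs ih =>
    by_cases hx : k x = true
    · have h1 : PySem.List.insertBy (fun a b => decide (k a < k b)) x (fs ++ ts) = (fs ++ (ts ++ [x])) := by
        rw [pv_insertBy_all_false, List.append_assoc]
        intro y _; simp [hx, Bool.lt_iff]
      rw [List.foldl_cons, h1, ih fs (ts ++ [x]) hf
        (by intro y hy; rcases List.mem_append.1 hy with h | h
            · exact ht y h
            · simp at h; simpa [h] using hx)]
      simp [hx]
    · have hx' : k x = false := by simpa using hx
      have h1 : PySem.List.insertBy (fun a b => decide (k a < k b)) x (fs ++ ts) = (fs ++ [x]) ++ ts := by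
        rw [pv_insertBy_append _ _ _ _ (by intro y hy; simp [hx', hf y hy])]
        cases ts with
        | nil => simp [PySem.List.insertBy]
        | cons t ts' =>
          simp [PySem.List.insertBy, Bool.lt_iff, hx', ht t (List.mem_cons_self)]
      rw [List.foldl_cons, h1, ih (fs ++ [x]) ts
        (by intro y hy; rcases List.mem_append.1 hy with h | h
            · exact hf y h
            · simp at h; simpa [h] using hx') ht]
      simp [hx']

-- sorted with a Bool key = stable partition
theorem pv_sorted_bool {α : Type} (k : α → Bool) (xs : List α) :
    PySem.List.sorted xs k false = xs.filter (fun x => !(k x)) ++ xs.filter k := by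
  have := pv_fold_insert_bool k xs [] [] (by simp) (by simp)
  simpa [PySem.List.sorted] using this

-- ===== VERDICT =====
theorem rebuild_race_results_with_disqualified_drivers_spec : Claim_equal_rebuild_race_results_with_disqualified_drivers := by
  intro results _
  unfold Spec_rebuild_race_results_with_disqualified_drivers
  unfold rebuild_race_results_with_disqualified_drivers rebuild_race_results_with_disqualified_drivers_alt
  rw [pvA_fold1, pvA_fold2, pv_sorted_bool]
  simp [pv_enumerate_map, PySem.List.enumerate_append, bne]
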